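-- pv_equiv track=rewrite | github.com/FrancoMosca/TP2 | Detector_Patentes.py | Limpieza
-- ===== SOURCE A (Python) =====
-- def Limpieza(Texto_Ingresado:str)->str:
--     """
--     Precondiciones: Requiere un texto
--     Postcondiciones: Devuelve el texto sin alfanumericos, exeptuando las mayusculas y los numeros
--     """
--
--     Texto_Ingresado:list = list(Texto_Ingresado)
--     Permitidos:list = ["Q","W","E","R","T","Y","U","I","O","P","A","S","D","F","G","H","J","K","L","Ñ","Z","X","C","V","B","N","M","0","1","2","3","4","5","6","7","8","9"]
--     Texto_Devuelto:list = []
--     for letra in Texto_Ingresado: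
--         if letra in Permitidos:
--             Texto_Devuelto.append(letra)
--     Texto_Devuelto = "".join(Texto_Devuelto)
--
--     return Texto_Devuelto
-- ===== SOURCE B (Python) =====
-- import re
--
-- def Limpieza(Texto_Ingresado: str) -> str:
--     # Single regex pass: delete every character outside the allowed class
--     # (26 ASCII uppercase letters, the letter N-tilde, digits 0-9).
--     return re.sub(r'[^A-Z\u00d10-9]', '', Texto_Ingresado)
-- ===== Notes on version B (the rewrite author's own statement) =====
-- stated objective: idiomatic
-- what changed: Replaced the explicit append loop with membership tests against a 37-element list by a single re.sub call deleting every character outside the class [A-ZÑ0-9].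
import Mathlib
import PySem

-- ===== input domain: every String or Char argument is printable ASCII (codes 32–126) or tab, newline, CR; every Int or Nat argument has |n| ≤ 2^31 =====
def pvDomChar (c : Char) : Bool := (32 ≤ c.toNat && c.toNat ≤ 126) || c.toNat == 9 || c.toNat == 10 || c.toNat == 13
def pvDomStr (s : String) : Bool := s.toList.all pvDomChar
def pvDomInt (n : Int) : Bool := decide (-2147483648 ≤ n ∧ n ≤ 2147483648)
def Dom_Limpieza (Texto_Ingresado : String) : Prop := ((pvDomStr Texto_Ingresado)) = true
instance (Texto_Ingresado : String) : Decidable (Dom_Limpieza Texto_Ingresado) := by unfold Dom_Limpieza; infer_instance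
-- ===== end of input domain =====

-- B replaces A's hand-written append loop over a 37-element membership list by a single
-- regex character-class filter (idiomatic); equivalence proved on printable-ASCII inputs.


-- ===== PORT A =====
-- A: build the allowed-character list, then loop appending each allowed char to an accumulator.
def pvPermitidos : List Char :=
  ['Q','W','E','R','T','Y','U','I','O','P','A','S','D','F','G','H','J','K','L','Ñ',
   'Z','X','C','V','B','N','M','0','1','2','3','4','5','6','7','8','9']

def Limpieza (Texto_Ingresado : String) : String :=
  let texto := Texto_Ingresado.toList
  let devuelto :=
    texto.foldl (fun acc letra => if pvPermitidos.contains letra then acc ++ [letra] else acc) []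
  String.mk devuelto

-- ===== PORT B =====
-- B: re.sub(r'[^A-ZÑ0-9]', '', s) — keep exactly the chars matching the class [A-ZÑ0-9].
def pvClassB (c : Char) : Bool :=
  ('A' ≤ c && c ≤ 'Z') || c == 'Ñ' || ('0' ≤ c && c ≤ '9')

def Limpieza_alt (Texto_Ingresado : String) : String :=
  String.mk (Texto_Ingresado.toList.filter pvClassB)

-- ===== PRECONDITION & SPEC =====
def Spec_Limpieza (Texto_Ingresado : String) (out : String) : Prop := out = Limpieza_alt Texto_Ingresado
instance (Texto_Ingresado : String) (out : String) : Decidable (Spec_Limpieza Texto_Ingresado out) := by unfold Spec_Limpieza; infer_instance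

-- ===== CLAIM (what is proved, stated in full; the proofs are below) =====
def Claim_equal_Limpieza : Prop := ∀ (Texto_Ingresado : String), Dom_Limpieza Texto_Ingresado → Spec_Limpieza Texto_Ingresado (Limpieza Texto_Ingresado)

-- ===== LEMMAS AND PROOFS =====

-- the two per-character tests agree on every char of code < 128 (checked by decide)
theorem pv_class_small : ∀ n ∈ List.range 128,
    pvPermitidos.contains (Char.ofNat n) = pvClassB (Char.ofNat n) := by
  set_option maxRecDepth 4000 in decide

theorem pv_class_eq (c : Char) (h : pvDomChar c = true) :
    pvPermitidos.contains c = pvClassB c := by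
  have hlt : c.toNat ∈ List.range 128 := by
    simp only [pvDomChar, Bool.or_eq_true, Bool.and_eq_true, decide_eq_true_eq,
      beq_iff_eq] at h
    simp only [List.mem_range]
    omega
  have := pv_class_small c.toNat hlt
  rwa [Char.ofNat_toNat] at this

theorem pv_foldl_filter (l : List Char) (acc : List Char) :
    l.foldl (fun acc letra => if pvPermitidos.contains letra then acc ++ [letra] else acc) acc
      = acc ++ l.filter (fun letra => pvPermitidos.contains letra) := by
  induction l generalizing acc with
  | nil => simp
  | cons c l ih =>
    simp only [List.foldl_cons, List.filter_cons, ih]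
    by_cases h : c ∈ pvPermitidos
    · simp [h]
    · simp [h]

-- ===== VERDICT (by name: the statement is the Claim_ definition above) =====
theorem Limpieza_spec : Claim_equal_Limpieza := by
  intro s hdom
  unfold Spec_Limpieza Limpieza Limpieza_alt
  simp only [pv_foldl_filter, List.nil_append]
  congr 1
  apply List.filter_congr
  intro c hc
  exact pv_class_eq c (by
    have : pvDomStr s = true := hdom
    simp only [pvDomStr, List.all_eq_true] at this
    exact this c hc)
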